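-- pv_equiv track=rewrite | github.com/Chrisaor/StudyPython | GeeksforGeeks/Practice/2. Basic/41.NumberSparse.py | number_sparse
-- ===== SOURCE A (Python) =====
-- def number_sparse(N):
--     cnt1 = 0
--     while N > 0:
--         if N % 2 == 1:
--             if cnt1 == 1:
--                 return 0
--             else:
--                 cnt1 += 1
--         else:
--             cnt1 = 0
--         N = N >> 1
--     return 1
-- ===== SOURCE B (Python) =====
-- def number_sparse(N):
--     # Sparse <=> no two adjacent set bits <=> N & (N >> 1) == 0.
--     # For N <= 0 the answer is 1 (no positive bits to inspect).
--     return 1 if N <= 0 or (N & (N >> 1)) == 0 else 0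
-- ===== Notes on version B (the rewrite author's own statement) =====
-- stated objective: idiomatic
-- what changed: Replaces the per-bit while loop tracking a consecutive-ones counter with the single bitwise identity: a number is sparse iff ANDing it with its own right shift gives zero; for nonpositive inputs both return 1 since A's loop never runs.
import Mathlib
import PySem

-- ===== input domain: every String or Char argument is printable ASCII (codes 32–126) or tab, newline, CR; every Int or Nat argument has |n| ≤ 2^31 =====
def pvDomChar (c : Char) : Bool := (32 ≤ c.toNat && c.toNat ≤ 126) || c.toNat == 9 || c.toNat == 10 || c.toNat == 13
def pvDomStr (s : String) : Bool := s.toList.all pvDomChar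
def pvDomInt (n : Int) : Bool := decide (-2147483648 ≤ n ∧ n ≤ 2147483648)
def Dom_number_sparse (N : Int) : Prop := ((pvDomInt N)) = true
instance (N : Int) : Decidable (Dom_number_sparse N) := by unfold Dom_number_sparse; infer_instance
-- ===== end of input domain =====

-- B replaces A's per-bit while loop by the one-shot bitwise test N & (N >> 1) == 0 (idiomatic).

-- ===== PORT A =====
-- termination helper for the while loop (N >> 1 strictly shrinks a positive N)
theorem pv_shift_lt (N : Int) (h : N > 0) : (N >>> (1:Nat)).toNat < N.toNat := by
  obtain ⟨m, rfl⟩ : ∃ m : Nat, N = (m : Int) := ⟨N.toNat, (Int.toNat_of_nonneg h.le).symm⟩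
  rw [← Int.natCast_shiftRight]
  simp [Nat.shiftRight_one]
  have hm : 0 < m := by exact_mod_cast h
  omega

-- the while loop of A: state (N, cnt1), early return 0 on a second adjacent 1-bit
def numberSparseLoop (N cnt1 : Int) : Int :=
  if _h : N > 0 then
    if PySem.Int.mod N 2 = 1 then
      if cnt1 = 1 then 0
      else numberSparseLoop (N >>> (1:Nat)) (cnt1 + 1)
    else numberSparseLoop (N >>> (1:Nat)) 0
  else 1
termination_by N.toNat
decreasing_by all_goals exact pv_shift_lt N _h

def number_sparse (N : Int) : Int := numberSparseLoop N 0

-- ===== PORT B =====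
def number_sparse_alt (N : Int) : Int :=
  if N ≤ 0 ∨ PySem.Int.band N (N >>> (1:Nat)) = 0 then 1 else 0

-- ===== PRECONDITION & SPEC =====
def Spec_number_sparse (N : Int) (out : Int) : Prop := out = number_sparse_alt N
instance (N : Int) (out : Int) : Decidable (Spec_number_sparse N out) := by unfold Spec_number_sparse; infer_instance

-- ===== CLAIM (what is proved, stated in full; the proofs are below) =====
def Claim_equal_number_sparse : Prop := ∀ (N : Int), Dom_number_sparse N → Spec_number_sparse N (number_sparse N)

-- ===== LEMMAS AND PROOFS =====

theorem nat_eq_zero_iff_testBit (a : Nat) : a = 0 ↔ ∀ i, a.testBit i = false :=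
  ⟨by rintro rfl i; simp, fun h => Nat.eq_of_testBit_eq fun i => by simp [h i]⟩

-- "sparse" as a statement about bits
theorem sparse_iff_bits (n : Nat) :
    (n &&& (n >>> 1) = 0) ↔ ∀ i, ¬(n.testBit i = true ∧ n.testBit (i + 1) = true) := by
  rw [nat_eq_zero_iff_testBit]
  constructor
  · intro h i hc
    have := h i
    simp [Nat.testBit_and, Nat.testBit_shiftRight, hc.1, Nat.add_comm 1 i, hc.2] at this
  · intro h i
    simp only [Nat.testBit_and, Nat.testBit_shiftRight, Nat.add_comm 1 i]
    have := h i
    cases hb : n.testBit i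
    · simp
    · simp [hb] at this
      simp [this]

-- the recursive characterisation of sparseness A's loop follows
theorem sparse_rec (n : Nat) :
    (n &&& (n >>> 1) = 0) ↔
      ((n / 2) &&& ((n / 2) >>> 1) = 0 ∧ ¬(n % 2 = 1 ∧ (n / 2) % 2 = 1)) := by
  rw [sparse_iff_bits, sparse_iff_bits]
  have hdiv : ∀ i, (n / 2).testBit i = n.testBit (i + 1) := fun i => by
    simp [Nat.testBit_succ]
  have h0 : (n.testBit 0 = true) ↔ n % 2 = 1 := by
    simp [Nat.testBit_zero]
  have h1 : ((n / 2).testBit 0 = true) ↔ (n / 2) % 2 = 1 := by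
    simp [Nat.testBit_zero]
  constructor
  · intro h
    refine ⟨fun i => by rw [hdiv, hdiv]; exact h (i + 1), fun hc => ?_⟩
    exact h 0 ⟨h0.2 hc.1, by rw [← Nat.zero_add 1, ← hdiv]; exact h1.2 hc.2⟩
  · rintro ⟨h, h01⟩ i hc
    cases i with
    | zero => exact h01 ⟨h0.1 hc.1, h1.1 (by rw [hdiv]; exact hc.2)⟩
    | succ j => exact h j (by rw [hdiv, hdiv]; exact hc)

theorem cast_shift (m : Nat) : ((m : Int) >>> (1:Nat)) = ((m >>> 1 : Nat) : Int) :=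
  (Int.natCast_shiftRight m 1).symm

theorem mod_cast2 (n : Nat) : PySem.Int.mod (n : Int) 2 = ((n % 2 : Nat) : Int) := by
  simp [PySem.Int.mod, Int.fmod_eq_emod]

-- loop invariant: for cnt1 ∈ {0,1}, A's loop decides sparseness, with cnt1 = 1
-- recording that the previous (lower) bit was set
theorem loop_eq (n : Nat) (c : Int) (hc : c = 0 ∨ c = 1) :
    numberSparseLoop (n : Int) c =
      if (n &&& (n >>> 1) = 0 ∧ ¬(c = 1 ∧ n % 2 = 1)) then 1 else 0 := by
  induction n using Nat.strong_induction_on generalizing c with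
  | _ n ih =>
    by_cases hn : 0 < n
    · have hpos : (0:Int) < (n:Int) := by exact_mod_cast hn
      have hlt : n / 2 < n := Nat.div_lt_self hn (by norm_num)
      have hshift : ((n:Int) >>> (1:Nat)) = ((n / 2 : Nat) : Int) := by
        rw [cast_shift, Nat.shiftRight_one]
      rw [numberSparseLoop, dif_pos hpos, mod_cast2, hshift]
      by_cases hodd : n % 2 = 1
      · rw [if_pos (by exact_mod_cast hodd)]
        rcases hc with rfl | rfl
        · rw [if_neg (by norm_num), show ((0:ℤ)+1)=1 from by norm_num, ih (n / 2) hlt 1 (Or.inr rfl)]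
          have := sparse_rec n
          by_cases hs : n &&& (n >>> 1) = 0
          · have h2 := (this.1 hs)
            rw [if_pos ⟨h2.1, fun hx => h2.2 ⟨hodd, hx.2⟩⟩, if_pos ⟨hs, by simp⟩]
          · rw [if_neg, if_neg (by simp [hs])]
            rintro ⟨hs2, hnd⟩
            exact hs (this.2 ⟨hs2, fun hx => hnd ⟨rfl, hx.2⟩⟩)
        · rw [if_pos rfl, if_neg]; rintro ⟨_, hnd⟩; exact hnd ⟨rfl, hodd⟩
      · rw [if_neg (by exact_mod_cast hodd), ih (n / 2) hlt 0 (Or.inl rfl)]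
        have := sparse_rec n
        by_cases hs : n &&& (n >>> 1) = 0
        · rw [if_pos ⟨(this.1 hs).1, by norm_num⟩, if_pos ⟨hs, fun hx => hodd hx.2⟩]
        · rw [if_neg, if_neg (by simp [hs])]
          rintro ⟨hs2, _⟩
          exact hs (this.2 ⟨hs2, fun hx => hodd hx.1⟩)
    · have hn0 : n = 0 := by omega
      subst hn0
      rw [numberSparseLoop, dif_neg (by norm_num), if_pos (by simp)]

-- ===== VERDICT (by name: the statement is the Claim_ definition above) =====
theorem number_sparse_spec : Claim_equal_number_sparse := by
  intro N _
  unfold Spec_number_sparse number_sparse number_sparse_alt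
  by_cases h : N ≤ 0
  · rw [numberSparseLoop, dif_neg (by omega), if_pos (Or.inl h)]
  · have h : 0 < N := by omega
    obtain ⟨m, rfl⟩ : ∃ m : Nat, N = (m : Int) := ⟨N.toNat, (Int.toNat_of_nonneg h.le).symm⟩
    rw [loop_eq m 0 (Or.inl rfl)]
    have hb : PySem.Int.band (m : Int) ((m:Int) >>> (1:Nat)) = ((m &&& (m >>> 1) : Nat) : Int) := by
      rw [cast_shift]; exact PySem.Int.band_natCast m (m >>> 1)
    by_cases hs : m &&& (m >>> 1) = 0
    · rw [if_pos ⟨hs, by norm_num⟩, if_pos (Or.inr (by rw [hb, hs]; rfl))]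
    · rw [if_neg (by simp [hs]), if_neg]
      rintro (hle | hz)
      · omega
      · rw [hb] at hz; exact hs (by exact_mod_cast hz)
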